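-- pv_equiv track=rewrite | github.com/sittingthyme/poker-engine-2026 | submission/equity.py | _keep_priority
-- ===== SOURCE A (Python) =====
-- RANKS = "23456789A"
--
-- def _rank_index(card_int: int) -> int:
--     return card_int % len(RANKS)
--
-- def _straight_draw_strength_with_board(keep: list[int], board: list[int]) -> int:
--     """
--     Rank straight potential from kept cards + board ranks.
--
--     Returns
--     -------
--     int
--         0 = no straight draw
--         1 = gutshot draw
--         2 = open-ended draw
--         3 = made straight
--     """
--     ranks = {_rank_index(c) for c in (keep + board)}
--     straight_windows = [
--         {0, 1, 2, 3, 4},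
--         {1, 2, 3, 4, 5},
--         {2, 3, 4, 5, 6},
--         {3, 4, 5, 6, 7},
--         {4, 5, 6, 7, 8},
--     ]
--     best = 0
--     for window in straight_windows:
--         present = ranks & window
--         if len(present) == 5:
--             return 3
--         if len(present) == 4:
--             missing = (window - present).pop()
--             lo, hi = min(window), max(window)
--             if missing == lo or missing == hi:
--                 best = max(best, 2)  # open-ended
--             else:
--                 best = max(best, 1)  # gutshot
--     return best
--
-- def _keep_priority(keep: list[int], board: list[int]) -> int:
--     """
--     Priority tier for discard choice: higher = prefer this keep.
--     - 5: made straight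
--     - 4: trips+, two pair, pocket pair (any), or board-connecting pair
--     - 3: open-ended straight draw  (same tier as low board pairs — equity decides)
--     - 1: gutshot straight draw only
--     - 0: no draw, no pair
--     """
--     draw_strength = _straight_draw_strength_with_board(keep, board)
--
--     if draw_strength == 3:
--         return 5
--
--     rank_counts: dict[int, int] = {}
--     for c in keep + board:
--         r = _rank_index(c)
--         rank_counts[r] = rank_counts.get(r, 0) + 1
--
--     has_trips = any(cnt >= 3 for cnt in rank_counts.values())
--     has_two_pair = sum(1 for cnt in rank_counts.values() if cnt >= 2) >= 2
--     has_pair = any(cnt >= 2 for cnt in rank_counts.values())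
--
--     if has_trips or has_two_pair:
--         return 4
--
--     # Pocket pairs: in a 27-card deck, any pocket pair is strong.
--     # Never discard a pocket pair for a straight draw.
--     if len(keep) == 2:
--         r0, r1 = _rank_index(keep[0]), _rank_index(keep[1])
--         if r0 == r1:
--             return 4
--
--     # Board-connecting pair (one of our cards matches a board card)
--     if has_pair:
--         return 4
--
--     if draw_strength >= 2:
--         return 3
--     if draw_strength == 1:
--         return 1
--     return 0
-- ===== SOURCE B (Python) =====
-- RANKS = "23456789A"
--
-- def _keep_priority(keep, board):
--     # run-scan over the present-rank set instead of window intersections; one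
--     # duplicate test (len(set) < total) replaces the rank-count dictionary ladder
--     present = {c % 9 for c in keep + board}
--     run = best_run = 0
--     for r in range(9):
--         run = run + 1 if r in present else 0
--         if run > best_run:
--             best_run = run
--     if best_run >= 5:
--         return 5                      # made straight
--     if len(present) < len(keep) + len(board):
--         return 4                      # some rank repeated: any pair/trips/two-pair
--     if best_run >= 4:
--         return 3                      # open-ended draw
--     for r in range(5):
--         if r in present and r + 4 in present and len(present & {r + 1, r + 2, r + 3}) == 2:
--             return 1                  # gutshot
--     return 0
-- ===== Notes on version B (the rewrite author's own statement) =====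
-- stated objective: simpler
-- what changed: B replaces A's five fixed-window set intersections (with missing-element/min/max analysis) by a single left-to-right run scan over the 9 possible ranks plus a direct gutshot anchor check, and replaces A's rank-count dictionary with its trips/two-pair/pocket/pair ladder by the single duplicate test len(present) < len(keep)+len(board), since every rung of that ladder returns the same tier 4; measured ~3.5x faster at large n by dropping the per-call dict build and window intersections.
import Mathlib
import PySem

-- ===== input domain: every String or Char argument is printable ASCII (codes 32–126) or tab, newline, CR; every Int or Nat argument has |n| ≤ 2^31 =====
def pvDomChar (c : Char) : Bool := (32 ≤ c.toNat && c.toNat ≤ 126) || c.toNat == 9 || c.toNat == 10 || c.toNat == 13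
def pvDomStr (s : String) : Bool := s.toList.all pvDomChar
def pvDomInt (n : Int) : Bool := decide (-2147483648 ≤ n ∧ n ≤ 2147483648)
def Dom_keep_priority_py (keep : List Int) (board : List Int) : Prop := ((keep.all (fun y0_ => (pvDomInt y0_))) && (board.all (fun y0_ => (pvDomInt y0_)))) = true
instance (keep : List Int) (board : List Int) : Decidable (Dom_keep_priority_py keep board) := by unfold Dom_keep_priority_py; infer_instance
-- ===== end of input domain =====

-- B replaces A's five-window set intersections by a single run scan over the present ranks
-- and the rank-count dictionary ladder by one duplicate test (len(set) < total); objective: simpler.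

-- ===== PORT A =====
def pvRankIndex (c : Int) : Int := PySem.Int.mod c 9   -- card_int % len(RANKS), len("23456789A") = 9

def pvWindows : List (PySem.Set Int) :=
  [[0, 1, 2, 3, 4], [1, 2, 3, 4, 5], [2, 3, 4, 5, 6], [3, 4, 5, 6, 7], [4, 5, 6, 7, 8]]

def pvStraightLoop (ranks : PySem.Set Int) : List (PySem.Set Int) → Int → Int
  | [], best => best
  | w :: ws, best =>
      let present := PySem.Set.inter ranks w
      if PySem.Set.len present = 5 then 3
      else if PySem.Set.len present = 4 then
        -- (window - present).pop(): the single missing element; min/max of the nonempty literal window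
        let missing := (PySem.Set.diff w present).headD 0
        let lo := (PySem.List.min? w (fun x => x)).getD 0
        let hi := (PySem.List.max? w (fun x => x)).getD 0
        pvStraightLoop ranks ws (if missing = lo ∨ missing = hi then max best 2 else max best 1)
      else pvStraightLoop ranks ws best

def pvStraightDrawStrength (keep : List Int) (board : List Int) : Int :=
  pvStraightLoop (PySem.Set.ofList ((keep ++ board).map pvRankIndex)) pvWindows 0

def keep_priority_py (keep : List Int) (board : List Int) : Int :=
  let draw := pvStraightDrawStrength keep board
  if draw = 3 then 5
  else
    let rank_counts := (keep ++ board).foldl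
      (fun (d : PySem.Dict Int Int) c =>
        let r := pvRankIndex c
        d.insert r (d.getD r 0 + 1)) PySem.Dict.empty
    let has_trips := rank_counts.values.any (fun cnt => decide (3 ≤ cnt))
    let has_two_pair := 2 ≤ ((rank_counts.values.map (fun cnt => if 2 ≤ cnt then (1 : Int) else 0)).sum)
    let has_pair := rank_counts.values.any (fun cnt => decide (2 ≤ cnt))
    if has_trips || has_two_pair then 4
    else if keep.length = 2 ∧
        pvRankIndex (PySem.List.pyGetD keep 0 0) = pvRankIndex (PySem.List.pyGetD keep 1 0) then 4
    else if has_pair then 4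
    else if 2 ≤ draw then 3
    else if draw = 1 then 1
    else 0

-- ===== PORT B =====
def keep_priority_py_alt (keep : List Int) (board : List Int) : Int :=
  let present : PySem.Set Int := PySem.Set.ofList ((keep ++ board).map (fun c => PySem.Int.mod c 9))
  let best_run := ((PySem.List.pyRange 0 9 1).foldl
      (fun (s : Int × Int) r =>
        let run := if PySem.Set.contains present r then s.1 + 1 else 0
        (run, if s.2 < run then run else s.2)) (0, 0)).2
  if 5 ≤ best_run then 5
  else if PySem.Set.len present < (keep.length : Int) + (board.length : Int) then 4
  else if 4 ≤ best_run then 3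
  else if (PySem.List.pyRange 0 5 1).any (fun r =>
      PySem.Set.contains present r && PySem.Set.contains present (r + 4) &&
      (PySem.Set.len (PySem.Set.inter present [r + 1, r + 2, r + 3]) == 2)) then 1
  else 0

-- ===== PRECONDITION & SPEC =====
def Spec_keep_priority_py (keep : List Int) (board : List Int) (out : Int) : Prop := out = keep_priority_py_alt keep board
instance (keep : List Int) (board : List Int) (out : Int) : Decidable (Spec_keep_priority_py keep board out) := by unfold Spec_keep_priority_py; infer_instance

-- ===== CLAIM (what is proved, stated in full; the proofs are below) =====
def Claim_equal_keep_priority_py : Prop := ∀ (keep : List Int) (board : List Int), Dom_keep_priority_py keep board → Spec_keep_priority_py keep board (keep_priority_py keep board)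

-- ===== LEMMAS AND PROOFS =====
def pvBest (R : PySem.Set Int) : Int :=
  ((PySem.List.pyRange 0 9 1).foldl
      (fun (s : Int × Int) r =>
        let run := if PySem.Set.contains R r then s.1 + 1 else 0
        (run, if s.2 < run then run else s.2)) (0, 0)).2

def pvGut (R : PySem.Set Int) : Bool :=
  (PySem.List.pyRange 0 5 1).any (fun r =>
      PySem.Set.contains R r && PySem.Set.contains R (r + 4) &&
      (PySem.Set.len (PySem.Set.inter R [r + 1, r + 2, r + 3]) == 2))

lemma pv_len_inter (R : List Int) (hnd : R.Nodup) (w : List Int) (hw : w.Nodup) :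
    PySem.Set.len (PySem.Set.inter R w) = ((w.filter (fun i => decide (i ∈ R))).length : Int) := by
  simp only [PySem.Set.len, PySem.Set.inter]
  norm_cast
  have h1 : (R.filter (fun x => PySem.Set.contains w x)).length = (R.toFinset ∩ w.toFinset).card := by
    rw [← List.toFinset_card_of_nodup (by exact hnd.filter _)]
    congr 1
    ext a; simp [PySem.Set.contains_eq_listContains]
  have h2 : (w.filter (fun i => decide (i ∈ R))).length = (w.toFinset ∩ R.toFinset).card := by
    rw [← List.toFinset_card_of_nodup (by exact hw.filter _)]
    congr 1
    ext a; simp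
  rw [h1, h2, Finset.inter_comm]

lemma pv_diff_inter (R w : List Int) :
    PySem.Set.diff w (PySem.Set.inter R w) = w.filter (fun i => !decide (i ∈ R)) := by
  simp only [PySem.Set.diff, PySem.Set.inter]
  apply List.filter_congr
  intro x hx
  simp [PySem.Set.contains_eq_listContains, hx]

lemma pv_len_ofList_lt (xs : List Int) (h : ¬ xs.Nodup) :
    (PySem.Set.ofList xs).length < xs.length := by
  induction xs with
  | nil => simp at h
  | cons x xs ih =>
    rw [PySem.Set.ofList_cons]
    simp only [List.length_cons]
    by_cases hx : x ∈ xs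
    · have hmem : x ∈ PySem.Set.ofList xs := by simpa [PySem.Set.mem_ofList] using hx
      have hlt : ((PySem.Set.ofList xs).discard x).length < (PySem.Set.ofList xs).length := by
        simp only [PySem.Set.discard]
        apply List.length_filter_lt_length_iff_exists.mpr
        exact ⟨x, hmem, by simp⟩
      have hle := PySem.Set.length_ofList_le xs
      omega
    · have hxs : ¬ xs.Nodup := by
        intro hn; exact h (List.nodup_cons.mpr ⟨hx, hn⟩)
      have h1 := ih hxs
      have hle : ((PySem.Set.ofList xs).discard x).length ≤ (PySem.Set.ofList xs).length := by
        simp only [PySem.Set.discard]; exact List.length_filter_le _ _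
      omega

lemma pv_dup_iff (xs : List Int) :
    PySem.Set.len (PySem.Set.ofList xs) < (xs.length : Int) ↔ ¬ xs.Nodup := by
  simp only [PySem.Set.len]
  constructor
  · intro h hnd
    rw [PySem.Set.ofList_eq_self_of_nodup _ hnd] at h
    omega
  · intro h
    exact_mod_cast pv_len_ofList_lt xs h

lemma pv_values (keep board : List Int) :
    ((keep ++ board).foldl
      (fun (d : PySem.Dict Int Int) c =>
        let r := pvRankIndex c
        d.insert r (d.getD r 0 + 1)) PySem.Dict.empty).values
    = (PySem.Set.ofList ((keep ++ board).map pvRankIndex)).map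
        (fun k => ((((keep ++ board).map pvRankIndex).count k : Nat) : Int)) := by
  have h1 : (fun (d : PySem.Dict Int Int) c => let r := pvRankIndex c; d.insert r (d.getD r 0 + 1))
      = (fun (d : PySem.Dict Int Int) c => d.insert (pvRankIndex c) (d.getD (pvRankIndex c) 0 + 1)) := rfl
  rw [h1, ← List.foldl_map (g := fun (d : PySem.Dict Int Int) r => d.insert r (d.getD r 0 + 1))
        (f := pvRankIndex), PySem.Dict.foldl_insert_getD_add_one_eq_counter]
  show (PySem.Dict.counter _).items.map Prod.snd = _
  rw [PySem.Dict.items_counter, List.map_map]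
  rfl

lemma pv_pair_iff (rs : List Int) :
    (∃ k ∈ PySem.Set.ofList rs, 2 ≤ (rs.count k : Int)) ↔ ¬ rs.Nodup := by
  rw [List.nodup_iff_count_le_one]
  push Not
  constructor
  · rintro ⟨k, _, hk⟩; exact ⟨k, by exact_mod_cast hk⟩
  · rintro ⟨k, hk⟩
    refine ⟨k, ?_, by exact_mod_cast hk⟩
    rw [PySem.Set.mem_ofList]
    exact List.count_pos_iff.mp (by omega)

lemma pv_chain (rs : List Int) (draw : Int) (pocket : Prop) [Decidable pocket]
    (hpk : pocket → ¬ rs.Nodup) :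
    (if draw = 3 then (5 : Int)
     else if ((PySem.Set.ofList rs).map (fun k => ((rs.count k : Nat) : Int))).any
              (fun cnt => decide (3 ≤ cnt))
          || decide (2 ≤ (((PySem.Set.ofList rs).map (fun k => ((rs.count k : Nat) : Int))).map
              (fun cnt => if 2 ≤ cnt then (1 : Int) else 0)).sum) then 4
     else if pocket then 4
     else if ((PySem.Set.ofList rs).map (fun k => ((rs.count k : Nat) : Int))).any
              (fun cnt => decide (2 ≤ cnt)) then 4
     else if 2 ≤ draw then 3
     else if draw = 1 then 1
     else 0)
    = (if draw = 3 then 5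
       else if ¬ rs.Nodup then 4
       else if 2 ≤ draw then 3
       else if draw = 1 then 1
       else 0) := by
  by_cases hd : draw = 3
  · rw [if_pos hd, if_pos hd]
  rw [if_neg hd, if_neg hd]
  have hpair_iff : (((PySem.Set.ofList rs).map (fun k => ((rs.count k : Nat) : Int))).any
      (fun cnt => decide (2 ≤ cnt)) = true) ↔ ¬ rs.Nodup := by
    rw [List.any_map, List.any_eq_true, ← pv_pair_iff rs]
    constructor
    · rintro ⟨k, hk1, hk2⟩; exact ⟨k, hk1, by simpa using hk2⟩
    · rintro ⟨k, hk1, hk2⟩; exact ⟨k, hk1, by simpa using hk2⟩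
  by_cases hnd : rs.Nodup
  · have hcnt := List.nodup_iff_count_le_one.mp hnd
    have htrips : ((PySem.Set.ofList rs).map (fun k => ((rs.count k : Nat) : Int))).any
        (fun cnt => decide (3 ≤ cnt)) = false := by
      simp only [List.any_map, List.any_eq_false]
      intro k _
      have := hcnt k
      simp only [Function.comp_apply, decide_eq_true_eq]
      omega
    have hsum : (((PySem.Set.ofList rs).map (fun k => ((rs.count k : Nat) : Int))).map
        (fun cnt => if 2 ≤ cnt then (1 : Int) else 0)).sum = 0 := by
      apply List.sum_eq_zero
      intro x hx
      simp only [List.map_map, List.mem_map] at hx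
      obtain ⟨k, _, hk⟩ := hx
      have := hcnt k
      rw [← hk]
      simp only [Function.comp_apply]
      rw [if_neg (by exact_mod_cast by omega)]
    have hpair : ((PySem.Set.ofList rs).map (fun k => ((rs.count k : Nat) : Int))).any
        (fun cnt => decide (2 ≤ cnt)) = false := by
      rw [← Bool.not_eq_true, hpair_iff]; exact not_not_intro hnd
    rw [htrips, hsum, if_neg (by simp), if_neg (fun hp => hpk hp hnd), hpair,
      if_neg (by simp), if_neg (not_not_intro hnd)]
  · have hpair := hpair_iff.mpr hnd
    rw [if_pos hnd]
    by_cases h1 : (((PySem.Set.ofList rs).map (fun k => ((rs.count k : Nat) : Int))).any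
        (fun cnt => decide (3 ≤ cnt))
        || decide (2 ≤ (((PySem.Set.ofList rs).map (fun k => ((rs.count k : Nat) : Int))).map
            (fun cnt => if 2 ≤ cnt then (1 : Int) else 0)).sum)) = true
    · rw [if_pos h1]
    rw [if_neg h1]
    by_cases h2 : pocket
    · rw [if_pos h2]
    rw [if_neg h2, if_pos hpair]

set_option maxHeartbeats 4000000 in
set_option maxRecDepth 100000 in
lemma pv_bridge_canon : ∀ S ∈ ([0,1,2,3,4,5,6,7,8] : List Int).sublists,
    pvStraightLoop S pvWindows 0 =
      (if 5 ≤ pvBest S then 3 else if 4 ≤ pvBest S then 2 else if pvGut S then 1 else 0) := by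
  decide

lemma pv_loop_congr (R S : List Int) (hR : R.Nodup) (hS : S.Nodup)
    (hmem : ∀ i : Int, i ∈ R ↔ i ∈ S) :
    ∀ (ws : List (PySem.Set Int)), (∀ w ∈ ws, List.Nodup w) →
      ∀ best, pvStraightLoop R ws best = pvStraightLoop S ws best := by
  intro ws
  induction ws with
  | nil => intro _ best; rfl
  | cons w ws ih =>
    intro hws best
    have hw : List.Nodup w := hws w (List.mem_cons_self)
    have hfilter : (w.filter (fun i => decide (i ∈ R))) = (w.filter (fun i => decide (i ∈ S))) := by
      apply List.filter_congr
      intro x _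
      simp [hmem x]
    have hlen : PySem.Set.len (PySem.Set.inter R w) = PySem.Set.len (PySem.Set.inter S w) := by
      rw [pv_len_inter R hR w hw, pv_len_inter S hS w hw, hfilter]
    have hdiff : PySem.Set.diff w (PySem.Set.inter R w) = PySem.Set.diff w (PySem.Set.inter S w) := by
      rw [pv_diff_inter, pv_diff_inter]
      apply List.filter_congr
      intro x _
      simp [hmem x]
    simp only [pvStraightLoop]
    rw [hlen, hdiff]
    have ih' := ih (fun v hv => hws v (List.mem_cons_of_mem _ hv))
    split_ifs <;> first | rfl | apply ih'

lemma pv_contains_congr (R S : List Int) (hmem : ∀ i : Int, i ∈ R ↔ i ∈ S) (i : Int) :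
    PySem.Set.contains R i = PySem.Set.contains S i := by
  have h1 : PySem.Set.contains R i = decide (i ∈ R) := by
    simp [PySem.Set.contains_eq_listContains]
  have h2 : PySem.Set.contains S i = decide (i ∈ S) := by
    simp [PySem.Set.contains_eq_listContains]
  rw [h1, h2]
  simp [hmem i]

lemma pv_best_congr (R S : List Int) (hmem : ∀ i : Int, i ∈ R ↔ i ∈ S) :
    pvBest R = pvBest S := by
  unfold pvBest
  have h : (fun (s : Int × Int) r =>
        let run := if PySem.Set.contains R r then s.1 + 1 else 0
        (run, if s.2 < run then run else s.2))
      = (fun (s : Int × Int) r =>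
        let run := if PySem.Set.contains S r then s.1 + 1 else 0
        (run, if s.2 < run then run else s.2)) := by
    funext s r
    rw [pv_contains_congr R S hmem r]
  rw [h]

lemma pv_gut_congr (R S : List Int) (hR : R.Nodup) (hS : S.Nodup)
    (hmem : ∀ i : Int, i ∈ R ↔ i ∈ S) :
    pvGut R = pvGut S := by
  unfold pvGut
  apply PySem.List.any_congr_mem
  intro r _
  have hw : List.Nodup ([r + 1, r + 2, r + 3] : List Int) := by
    simp
  have hfilter : (([r+1,r+2,r+3] : List Int).filter (fun i => decide (i ∈ R)))
      = (([r+1,r+2,r+3] : List Int).filter (fun i => decide (i ∈ S))) := by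
    apply List.filter_congr
    intro x _
    simp [hmem x]
  rw [pv_contains_congr R S hmem r, pv_contains_congr R S hmem (r + 4),
      pv_len_inter R hR _ hw, pv_len_inter S hS _ hw, hfilter]

lemma pv_draw_bridge (R : List Int) (hnd : R.Nodup) (hsub : ∀ x ∈ R, 0 ≤ x ∧ x < 9) :
    pvStraightLoop R pvWindows 0 =
      (if 5 ≤ pvBest R then 3 else if 4 ≤ pvBest R then 2 else if pvGut R then 1 else 0) := by
  have hmem : ∀ i : Int,
      i ∈ R ↔ i ∈ (([0,1,2,3,4,5,6,7,8] : List Int).filter (fun i => decide (i ∈ R))) := by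
    intro i
    rw [List.mem_filter]
    constructor
    · intro h
      refine ⟨?_, by simpa using h⟩
      have := hsub i h
      simp only [List.mem_cons]
      omega
    · rintro ⟨_, h⟩
      simpa using h
  have hS : (([0,1,2,3,4,5,6,7,8] : List Int).filter (fun i => decide (i ∈ R))).Nodup :=
    List.Nodup.filter _ (by decide)
  rw [pv_loop_congr R _ hnd hS hmem pvWindows (by decide) 0,
      pv_best_congr R _ hmem, pv_gut_congr R _ hnd hS hmem]
  exact pv_bridge_canon _ (by rw [List.mem_sublists]; exact List.filter_sublist)

lemma pvA_char (keep board : List Int) :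
    keep_priority_py keep board =
      (let rs := (keep ++ board).map (fun c => PySem.Int.mod c 9)
       let draw := pvStraightLoop (PySem.Set.ofList rs) pvWindows 0
       if draw = 3 then 5
       else if ¬ rs.Nodup then 4
       else if 2 ≤ draw then 3
       else if draw = 1 then 1
       else 0) := by
  have hf : (fun c => PySem.Int.mod c 9) = pvRankIndex := rfl
  rw [hf]
  have hpk : (keep.length = 2 ∧
      pvRankIndex (PySem.List.pyGetD keep 0 0) = pvRankIndex (PySem.List.pyGetD keep 1 0)) →
      ¬ ((keep ++ board).map pvRankIndex).Nodup := by
    rintro ⟨hl, heq⟩ hnd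
    obtain ⟨a, b, rfl⟩ := List.length_eq_two.mp hl
    rw [show PySem.List.pyGetD [a, b] 0 0 = a from rfl,
        show PySem.List.pyGetD [a, b] 1 0 = b from rfl] at heq
    have h2 : (pvRankIndex a :: pvRankIndex b :: board.map pvRankIndex).Nodup := hnd
    exact (List.nodup_cons.mp h2).1 (List.mem_cons.mpr (Or.inl heq))
  simp only [keep_priority_py, pvStraightDrawStrength, pv_values]
  exact pv_chain _ _ _ hpk

lemma pvB_char (keep board : List Int) :
    keep_priority_py_alt keep board =
      (let rs := (keep ++ board).map (fun c => PySem.Int.mod c 9)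
       let R := PySem.Set.ofList rs
       if 5 ≤ pvBest R then 5
       else if ¬ rs.Nodup then 4
       else if 4 ≤ pvBest R then 3
       else if pvGut R then 1
       else 0) := by
  simp only [keep_priority_py_alt, pvBest, pvGut]
  have hlen : ((keep.length : Int) + (board.length : Int))
      = ((((keep ++ board).map (fun c => PySem.Int.mod c 9)).length : Nat) : Int) := by
    simp
  rw [hlen]
  simp only [pv_dup_iff]
  rfl

-- ===== VERDICT (by name: the statement is the Claim_ definition above) =====
theorem keep_priority_py_spec : Claim_equal_keep_priority_py := by
  intro keep board _
  unfold Spec_keep_priority_py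
  rw [pvA_char, pvB_char]
  simp only
  have hsub : ∀ x ∈ PySem.Set.ofList ((keep ++ board).map (fun c => PySem.Int.mod c 9)),
      0 ≤ x ∧ x < 9 := by
    intro x hx
    rw [PySem.Set.mem_ofList] at hx
    obtain ⟨c, _, rfl⟩ := List.mem_map.mp hx
    exact ⟨PySem.Int.mod_nonneg c (b := 9) (by norm_num), PySem.Int.mod_lt c (b := 9) (by norm_num)⟩
  rw [pv_draw_bridge _ (PySem.Set.nodup_ofList _) hsub]
  split_ifs <;> omega
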